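-- pv_equiv track=rewrite | github.com/mazumderr/hashcrackingscripts | haxor.py | haxor
-- ===== SOURCE A (Python) =====
-- from itertools import product, combinations
--
-- def haxor(password, limit):
--     passwords = []
--
--     char_replacements = {
--        'a': ['a', '4'],
--        'e': ['e', '3'],
--        'i': ['i', '1'],
--        't': ['t', '7'],
--        'o': ['o', '0']
--     }
--
--     replacement_pos = [i for i, char in enumerate(password) if char in char_replacements]
--
--     for num_replacements in range(1, min(limit, len(replacement_pos)) + 1):
--         for positions in combinations(replacement_pos, num_replacements):
--
--             options = [
--                 char_replacements[char] if i in positions else [char]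
--                 for i, char in enumerate(password)
--             ]
--
--             possibilities = product(*options)
--
--             for passwds in possibilities:
--                 passwords.append(''.join(passwds))
--
--     return passwords
-- ===== SOURCE B (Python) =====
-- def haxor(password, limit):
--     char_replacements = {
--        'a': ['a', '4'],
--        'e': ['e', '3'],
--        'i': ['i', '1'],
--        't': ['t', '7'],
--        'o': ['o', '0']
--     }
--     chars = list(password)
--     replacement_pos = [i for i, char in enumerate(password) if char in char_replacements]
--
--     def combos(k, xs):
--         if k == 0:
--             return [[]]
--         if not xs:
--             return []
--         return [[xs[0]] + rest for rest in combos(k - 1, xs[1:])] + combos(k, xs[1:])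
--
--     passwords = []
--     for k in range(1, min(limit, len(replacement_pos)) + 1):
--         for positions in combos(k, replacement_pos):
--             for mask in range(2 ** k):
--                 out = chars[:]
--                 for idx, pos in enumerate(positions):
--                     if (mask >> (k - 1 - idx)) & 1:
--                         out[pos] = char_replacements[chars[pos]][1]
--                 passwords.append(''.join(out))
--     return passwords
-- ===== Notes on version B (the rewrite author's own statement) =====
-- stated objective: alternative
-- what changed: Replaces itertools.product over per-index option lists (and the itertools.combinations import) with a hand-rolled recursive combination generator and an integer-bitmask enumeration of the 2^k replace/keep choices, building each variant by in-place assignment into a copy of the character list.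
import Mathlib
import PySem

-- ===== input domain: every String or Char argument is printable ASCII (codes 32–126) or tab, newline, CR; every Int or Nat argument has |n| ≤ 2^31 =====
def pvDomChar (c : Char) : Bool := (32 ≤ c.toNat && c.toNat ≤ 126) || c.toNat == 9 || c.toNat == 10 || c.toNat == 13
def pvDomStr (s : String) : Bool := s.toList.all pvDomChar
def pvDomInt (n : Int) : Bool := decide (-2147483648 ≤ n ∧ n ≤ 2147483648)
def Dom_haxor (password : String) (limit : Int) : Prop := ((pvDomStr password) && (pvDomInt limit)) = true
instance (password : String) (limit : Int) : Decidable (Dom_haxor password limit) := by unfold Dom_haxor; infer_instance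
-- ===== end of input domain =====

-- B replaces A's per-index option lists + itertools.product with a hand-rolled take/skip
-- combination recursion and integer-bitmask subset enumeration (alternative decomposition,
-- same output order and duplicates).

-- ===== PORT A =====
-- char_replacements (the literal dict both Pythons contain)
def pvCR : PySem.Dict Char (List Char) :=
  PySem.Dict.ofList [('a', ['a', '4']), ('e', ['e', '3']), ('i', ['i', '1']),
                     ('t', ['t', '7']), ('o', ['o', '0'])]

-- port of itertools.combinations(xs, k) (lexicographic subsets, as the Python docs specify)
def pvCombA : Nat → List Int → List (List Int)
  | 0, _ => [[]]
  | _ + 1, [] => []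
  | k + 1, x :: xs => ((pvCombA k xs).map (fun r => x :: r)) ++ pvCombA (k + 1) xs

-- port of itertools.product(*options) (first factor varies slowest)
def pvProd : List (List Char) → List (List Char)
  | [] => [[]]
  | o :: os => o.flatMap (fun c => (pvProd os).map (fun t => c :: t))

def haxor (password : String) (limit : Int) : List String :=
  let chars := password.toList
  let rpos : List Int :=
    ((PySem.List.enumerate chars 0).filter (fun p => pvCR.contains p.2)).map (fun p => p.1)
  (PySem.List.pyRange 1 (min limit (rpos.length : Int) + 1) 1).foldl (fun acc k =>
    (pvCombA k.toNat rpos).foldl (fun acc2 positions =>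
      let options : List (List Char) := (PySem.List.enumerate chars 0).map (fun p =>
        if positions.contains p.1 then pvCR.getD p.2 [] else [p.2])
      (pvProd options).foldl (fun acc3 cs => acc3 ++ [String.ofList cs]) acc2) acc) []

-- ===== PORT B =====
-- B's helper expression: char_replacements[chars[pos]][1]
def pvRepl (c : Char) : Char := (pvCR.getD c []).getD 1 c

-- B's hand-rolled recursive combos(k, xs)
def pvCombB : Nat → List Int → List (List Int)
  | 0, _ => [[]]
  | _ + 1, [] => []
  | k + 1, x :: xs => ((pvCombB k xs).map (fun r => x :: r)) ++ pvCombB (k + 1) xs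

-- B's inner loop: out = chars[:]; for idx, pos in enumerate(positions): bit-test, out[pos] = repl
def pvApply (chars : List Char) (positions : List Int) (k : Nat) (mask : Nat) : List Char :=
  (PySem.List.enumerate positions 0).foldl (fun out q =>
    if (mask >>> (k - 1 - q.1.toNat)) % 2 == 1 then
      PySem.List.pySetD out q.2 (pvRepl (PySem.List.pyGetD chars q.2 ' '))
    else out) chars

-- Python's `range(2 ** k)` (masks, all nonnegative) is ported exactly as List.range (2 ^ k)
def haxor_alt (password : String) (limit : Int) : List String :=
  let chars := password.toList
  let rpos : List Int :=
    ((PySem.List.enumerate chars 0).filter (fun p => pvCR.contains p.2)).map (fun p => p.1)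
  (PySem.List.pyRange 1 (min limit (rpos.length : Int) + 1) 1).foldl (fun acc k =>
    (pvCombB k.toNat rpos).foldl (fun acc2 positions =>
      (List.range (2 ^ k.toNat)).foldl (fun acc3 mask =>
        acc3 ++ [String.ofList (pvApply chars positions k.toNat mask)]) acc2) acc) []

-- ===== PRECONDITION & SPEC =====
def Spec_haxor (password : String) (limit : Int) (out : List String) : Prop := out = haxor_alt password limit
instance (password : String) (limit : Int) (out : List String) : Decidable (Spec_haxor password limit out) := by unfold Spec_haxor; infer_instance

-- ===== CLAIM (what is proved, stated in full; the proofs are below) =====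
def Claim_equal_haxor : Prop := ∀ (password : String) (limit : Int), Dom_haxor password limit → Spec_haxor password limit (haxor password limit)

-- ===== LEMMAS AND PROOFS =====

-- the two combination helpers compute the same list
theorem combA_eq_combB : ∀ (k : Nat) (xs : List Int), pvCombA k xs = pvCombB k xs := by
  intro k xs
  induction xs generalizing k with
  | nil => cases k <;> rfl
  | cons x xs ih => cases k with
    | zero => rfl
    | succ k => simp [pvCombA, pvCombB, ih]

theorem mem_comb_sublist {k : Nat} {xs P : List Int} (h : P ∈ pvCombA k xs) : P.Sublist xs := by
  induction xs generalizing k P with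
  | nil => cases k with
    | zero => simp [pvCombA] at h; simp [h]
    | succ k => simp [pvCombA] at h
  | cons x xs ih => cases k with
    | zero => simp [pvCombA] at h; simp [h]
    | succ k =>
      simp only [pvCombA, List.mem_append, List.mem_map] at h
      rcases h with ⟨r, hr, rfl⟩ | h
      · exact List.Sublist.cons₂ x (ih hr)
      · exact List.Sublist.cons x (ih h)

theorem mem_comb_length {k : Nat} {xs P : List Int} (h : P ∈ pvCombA k xs) : P.length = k := by
  induction xs generalizing k P with
  | nil => cases k with
    | zero => simp [pvCombA] at h; simp [h]
    | succ k => simp [pvCombA] at h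
  | cons x xs ih => cases k with
    | zero => simp [pvCombA] at h; simp [h]
    | succ k =>
      simp only [pvCombA, List.mem_append, List.mem_map] at h
      rcases h with ⟨r, hr, rfl⟩ | h
      · simp [ih hr]
      · exact ih h

-- the dictionary fact: a contained key maps to [key, replacement]
theorem pvCR_spec (c : Char) (h : pvCR.contains c = true) : pvCR.getD c [] = [c, pvRepl c] := by
  have hk : c ∈ pvCR.keys := (PySem.Dict.contains_iff_mem_keys pvCR c).mp h
  have : pvCR.keys = ['a', 'e', 'i', 't', 'o'] := by decide
  rw [this] at hk
  simp only [List.mem_cons, List.not_mem_nil, or_false] at hk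
  rcases hk with rfl | rfl | rfl | rfl | rfl <;> decide

-- MSB-first bit lists of the masks 0 .. 2^k-1, in mask order
def pvBits : Nat → List (List Bool)
  | 0 => [[]]
  | k + 1 => (pvBits k).map (fun bs => false :: bs) ++ (pvBits k).map (fun bs => true :: bs)

def pvBitsOf (k mask : Nat) : List Bool := (List.range k).map (fun i => mask.testBit (k - 1 - i))

theorem pvBitsOf_succ (k m : Nat) : pvBitsOf (k + 1) m = m.testBit k :: pvBitsOf k m := by
  simp only [pvBitsOf, List.range_succ_eq_map, List.map_cons, List.map_map]
  refine congrArg₂ List.cons (by simp) ?_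
  refine List.map_congr_left (fun i _ => ?_)
  simp only [Function.comp_apply]
  congr 1
  omega

theorem range_pow_map_bitsOf (k : Nat) :
    (List.range (2 ^ k)).map (pvBitsOf k) = pvBits k := by
  induction k with
  | zero => decide
  | succ k ih =>
    have hsplit : List.range (2 ^ (k + 1)) =
        List.range (2 ^ k) ++ (List.range (2 ^ k)).map (fun m => 2 ^ k + m) := by
      rw [pow_succ, mul_two, List.range_add]
    rw [hsplit, List.map_append, List.map_map, pvBits, ← ih, List.map_map, List.map_map]
    refine congrArg₂ (· ++ ·) ?_ ?_
    · refine List.map_congr_left (fun m hm => ?_)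
      simp only [Function.comp_apply, pvBitsOf_succ]
      rw [Nat.testBit_lt_two_pow (List.mem_range.mp hm)]
    · refine List.map_congr_left (fun m hm => ?_)
      simp only [Function.comp_apply, pvBitsOf_succ]
      have h1 : (2 ^ k + m).testBit k = true := by
        rw [Nat.testBit_two_pow_add_eq, Nat.testBit_lt_two_pow (List.mem_range.mp hm)]
        rfl
      rw [h1]
      refine congrArg₂ List.cons rfl ?_
      simp only [pvBitsOf]
      refine List.map_congr_left (fun i hi => ?_)
      exact Nat.testBit_two_pow_add_gt (by have := List.mem_range.mp hi; omega) m

-- relative-offset form of A's options comprehension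
def pvOptsRec (off : Int) : List Char → List Int → List (List Char)
  | [], _ => []
  | c :: cs, P => (if P.contains off then pvCR.getD c [] else [c]) :: pvOptsRec (off + 1) cs P

theorem options_eq_optsRec (chars : List Char) (P : List Int) (s : Int) :
    (PySem.List.enumerate chars s).map (fun p =>
      if P.contains p.1 then pvCR.getD p.2 [] else [p.2]) = pvOptsRec s chars P := by
  induction chars generalizing s with
  | nil => rfl
  | cons c cs ih =>
    rw [PySem.List.enumerate_cons, List.map_cons, ih]
    rfl

-- the common "variant" function: walk the chars, consuming (position, replace?) pairs in order
def pvVar : Int → List Char → List (Int × Bool) → List Char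
  | _, [], _ => []
  | _, c :: cs, [] => c :: cs
  | off, c :: cs, (p, b) :: rest =>
    if p = off then (if b then pvRepl c else c) :: pvVar (off + 1) cs rest
    else c :: pvVar (off + 1) cs ((p, b) :: rest)

theorem pvVar_nil (off : Int) (chars : List Char) : pvVar off chars [] = chars := by
  cases chars <;> rfl

theorem optsRec_congr (chars : List Char) (P P' : List Int) (off : Int)
    (h : ∀ i : Int, off ≤ i → (P.contains i = P'.contains i)) :
    pvOptsRec off chars P = pvOptsRec off chars P' := by
  induction chars generalizing off with
  | nil => rfl
  | cons c cs ih =>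
    simp only [pvOptsRec, h off le_rfl, ih (off + 1) (fun i hi => h i (by omega))]

-- ===== A's product over option lists is the bit-list map of variants =====
theorem prod_optsRec (chars : List Char) (P : List Int) (off : Int)
    (hgood : ∀ p ∈ P, ∃ j : Nat, off + j = p ∧ ∃ c, chars[j]? = some c ∧ pvCR.contains c = true)
    (hpw : P.Pairwise (· < ·)) :
    pvProd (pvOptsRec off chars P) =
      (pvBits P.length).map (fun bs => pvVar off chars (P.zip bs)) := by
  induction chars generalizing off P with
  | nil =>
    cases P with
    | nil => rfl
    | cons p ps =>
      obtain ⟨j, -, c, hc, -⟩ := hgood p List.mem_cons_self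
      simp at hc
  | cons c cs ih =>
    cases P with
    | nil =>
      have h1 : pvOptsRec off (c :: cs) [] = [c] :: pvOptsRec (off + 1) cs [] := by
        simp [pvOptsRec]
      rw [h1]
      show ([c].flatMap (fun x => (pvProd (pvOptsRec (off + 1) cs [])).map (fun t => x :: t))) = _
      rw [ih [] (off + 1) (by simp) (by simp)]
      simp [pvBits, pvVar_nil]
    | cons p ps =>
      have hoffle : off ≤ p := by
        obtain ⟨j, hj, -⟩ := hgood p List.mem_cons_self
        omega
      by_cases hpo : p = off
      · subst hpo
        obtain ⟨j, hj, c0, hc0, hcont⟩ := hgood p List.mem_cons_self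
        have hj0 : j = 0 := by omega
        subst hj0
        simp only [List.getElem?_cons_zero, Option.some.injEq] at hc0
        subst hc0
        have hcontab : (p :: ps).contains p = true := by simp
        have h1 : pvOptsRec p (c :: cs) (p :: ps) =
            [c, pvRepl c] :: pvOptsRec (p + 1) cs (p :: ps) := by
          simp only [pvOptsRec, hcontab, if_true, pvCR_spec c hcont]
        have h2 : pvOptsRec (p + 1) cs (p :: ps) = pvOptsRec (p + 1) cs ps := by
          refine optsRec_congr cs (p :: ps) ps (p + 1) (fun i hi => ?_)
          simp only [List.contains_cons]
          have hip : (i == p) = false := beq_eq_false_iff_ne.mpr (by omega)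
          rw [hip, Bool.false_or]
        have hgood' : ∀ q ∈ ps, ∃ j : Nat, (p + 1) + j = q ∧
            ∃ c', cs[j]? = some c' ∧ pvCR.contains c' = true := by
          intro q hq
          obtain ⟨j, hj, c', hc', hcont'⟩ := hgood q (List.mem_cons_of_mem _ hq)
          have hpq : p < q := List.rel_of_pairwise_cons hpw hq
          have hj1 : 1 ≤ j := by omega
          refine ⟨j - 1, by omega, c', ?_, hcont'⟩
          rcases Nat.exists_eq_add_of_le hj1 with ⟨j', rfl⟩
          rw [← hc']
          have h1j : (1 + j') = j' + 1 := by omega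
          rw [h1j, List.getElem?_cons_succ]
          simp
        have ihp := ih ps (p + 1) hgood' (List.Pairwise.of_cons hpw)
        rw [h1, h2]
        show ([c, pvRepl c].flatMap
          (fun x => (pvProd (pvOptsRec (p + 1) cs ps)).map (fun t => x :: t))) = _
        rw [ihp]
        simp only [List.length_cons, pvBits, List.flatMap_cons, List.flatMap_nil,
          List.map_append, List.map_map, List.append_nil]
        refine congrArg₂ (· ++ ·) ?_ ?_ <;>
        · refine List.map_congr_left (fun bs _ => ?_)
          simp [pvVar]
      · have hlt : off < p := lt_of_le_of_ne hoffle (fun h => hpo h.symm)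
        have hnotmem : (p :: ps).contains off = false := by
          simp only [List.contains_eq_mem, decide_eq_false_iff_not]
          intro hmem
          rcases List.mem_cons.mp hmem with rfl | hmem'
          · omega
          · exact absurd (List.rel_of_pairwise_cons hpw hmem') (by omega)
        have h1 : pvOptsRec off (c :: cs) (p :: ps) =
            [c] :: pvOptsRec (off + 1) cs (p :: ps) := by
          simp only [pvOptsRec, hnotmem]
          rfl
        have hgood' : ∀ q ∈ p :: ps, ∃ j : Nat, (off + 1) + j = q ∧
            ∃ c', cs[j]? = some c' ∧ pvCR.contains c' = true := by
          intro q hq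
          obtain ⟨j, hj, c', hc', hcont'⟩ := hgood q hq
          have hoq : off < q := by
            rcases List.mem_cons.mp hq with rfl | hmem'
            · exact hlt
            · exact lt_trans hlt (List.rel_of_pairwise_cons hpw hmem')
          have hj1 : 1 ≤ j := by omega
          refine ⟨j - 1, by omega, c', ?_, hcont'⟩
          rcases Nat.exists_eq_add_of_le hj1 with ⟨j', rfl⟩
          rw [← hc']
          have h1j : (1 + j') = j' + 1 := by omega
          rw [h1j, List.getElem?_cons_succ]
          simp
        have ihp := ih (p :: ps) (off + 1) hgood' hpw
        rw [h1]
        show ([c].flatMap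
          (fun x => (pvProd (pvOptsRec (off + 1) cs (p :: ps))).map (fun t => x :: t))) = _
        rw [ihp]
        simp only [List.flatMap_cons, List.flatMap_nil, List.map_map, List.append_nil]
        refine List.map_congr_left (fun bs _ => ?_)
        simp only [Function.comp_apply]
        cases bs with
        | nil => simp [pvVar_nil]
        | cons b bs' =>
          simp only [List.zip_cons_cons, pvVar, if_neg hpo]

-- ===== B's set-fold equals pvVar, pointwise =====
theorem pySetD_of_range {α : Type} (xs : List α) (p : Int) (v : α)
    (h0 : 0 ≤ p) (h1 : p < (xs.length : Int)) :
    PySem.List.pySetD xs p v = xs.set p.toNat v := by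
  have : p = ((p.toNat : Nat) : Int) := by omega
  rw [this]
  unfold PySem.List.pySetD
  rw [PySem.List.pySet?_natCast xs p.toNat v (by omega)]
  rfl

theorem foldSets_getElem? (chars : List Char) (pbs : List (Int × Bool))
    (hin : ∀ pb ∈ pbs, 0 ≤ pb.1 ∧ pb.1 < (chars.length : Int)) :
    ∀ cs : List Char, cs.length = chars.length → ∀ j : Nat,
      (pbs.foldl (fun out pb =>
        if pb.2 then PySem.List.pySetD out pb.1 (pvRepl (PySem.List.pyGetD chars pb.1 ' '))
        else out) cs)[j]? =
      if ((j : Int), true) ∈ pbs then chars[j]?.map pvRepl else cs[j]? := by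
  induction pbs with
  | nil => intro cs hlen j; simp
  | cons pb rest ih =>
    intro cs hlen j
    obtain ⟨p, b⟩ := pb
    obtain ⟨hp0, hp1⟩ := hin (p, b) List.mem_cons_self
    simp only at hp0 hp1
    have hlen' : (if b then PySem.List.pySetD cs p (pvRepl (PySem.List.pyGetD chars p ' '))
        else cs).length = chars.length := by
      split
      · rw [pySetD_of_range cs p _ hp0 (by omega)]; simp [hlen]
      · exact hlen
    simp only [List.foldl_cons]
    rw [ih (fun q hq => hin q (List.mem_cons_of_mem _ hq)) _ hlen']
    by_cases hmem : ((j : Int), true) ∈ rest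
    · simp [hmem]
    · simp only [hmem, if_false, List.mem_cons]
      by_cases hhit : ((j : Int) = p ∧ b = true)
      · obtain ⟨hjp, rfl⟩ := hhit
        rw [if_pos (Or.inl (show ((j : Int), true) = (p, true) by rw [hjp]))]
        rw [if_pos rfl]
        rw [pySetD_of_range cs p _ hp0 (by omega)]
        have hjn : p.toNat = j := by omega
        subst hjn
        rw [List.getElem?_set_self (by omega)]
        rw [PySem.List.pyGetD_eq_getElem chars ' ' hp0 hp1]
        rw [List.getElem?_eq_getElem (by omega)]
        simp
      · have hnot : ¬(((j : Int), true) = (p, b) ∨ False) := by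
          rintro (heq | hF)
          · injection heq with h1 h2
            exact hhit ⟨h1, h2.symm⟩
          · exact hF
        rw [if_neg hnot]
        by_cases hb : b
        · subst hb
          rw [if_pos rfl, pySetD_of_range cs p _ hp0 (by omega)]
          have hne : p.toNat ≠ j := by
            intro h
            exact hhit ⟨by omega, rfl⟩
          exact List.getElem?_set_ne hne
        · simp [hb]

theorem pvVar_getElem? (chars : List Char) (pbs : List (Int × Bool)) (off : Int)
    (hpw : pbs.Pairwise (fun x y => x.1 < y.1)) (hlb : ∀ pb ∈ pbs, off ≤ pb.1) :
    ∀ j : Nat, (pvVar off chars pbs)[j]? =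
      if (off + (j : Int), true) ∈ pbs then chars[j]?.map pvRepl else chars[j]? := by
  induction chars generalizing off pbs with
  | nil =>
    intro j
    simp only [pvVar]
    split <;> simp
  | cons c cs ih =>
    intro j
    match pbs, hpw, hlb with
    | [], _, _ => simp [pvVar]
    | (p, b) :: rest, hpw, hlb =>
      have hrest_gt : ∀ q ∈ rest, p < q.1 := fun q hq => List.rel_of_pairwise_cons hpw hq
      by_cases hpo : p = off
      · subst hpo
        simp only [pvVar, if_true]
        cases j with
        | zero =>
          simp only [List.getElem?_cons_zero]
          by_cases hb : b
          · subst hb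
            rw [if_pos (show (p + ((0 : Nat) : Int), true) ∈ (p, true) :: rest by simp)]
            simp
          · have hb' : b = false := by simpa using hb
            subst hb'
            have hnr : ((p, true) : Int × Bool) ∉ rest := by
              intro hm
              have := hrest_gt _ hm
              simp at this
            simp [hnr]
        | succ j =>
          simp only [List.getElem?_cons_succ]
          rw [ih rest (p + 1) (List.Pairwise.of_cons hpw)
            (fun q hq => by have := hrest_gt q hq; omega) j]
          have harith : p + 1 + (j : Int) = p + ((j + 1 : Nat) : Int) := by push_cast; omega
          rw [harith]
          congr 1
          simp only [List.mem_cons, eq_iff_iff]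
          constructor
          · exact Or.inr
          · rintro (heq | hm)
            · injection heq with h1 h2; omega
            · exact hm
      · have hplt : off < p := lt_of_le_of_ne (hlb (p, b) List.mem_cons_self) (fun h => hpo h.symm)
        simp only [pvVar, if_neg hpo]
        cases j with
        | zero =>
          simp only [List.getElem?_cons_zero]
          have hnr : ((off, true) : Int × Bool) ∉ rest := by
            intro hm
            have := hrest_gt _ hm
            simp at this
            omega
          have hop : off ≠ p := fun h => hpo h.symm
          simp [hnr, hop]
        | succ j =>
          simp only [List.getElem?_cons_succ]
          rw [ih ((p, b) :: rest) (off + 1) hpw (by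
            intro q hq
            rcases List.mem_cons.mp hq with rfl | hm
            · simpa using hplt
            · have := hrest_gt _ hm; omega) j]
          have harith : off + 1 + (j : Int) = off + ((j + 1 : Nat) : Int) := by push_cast; omega
          rw [harith]

-- the enumerate-indexed fold over positions is the fold over positions zipped with a bit list
theorem enum_fold_zip {β : Type} (P : List Int) (F : Nat → Bool)
    (step : List β → Int → Bool → List β) :
    ∀ (s : Nat) (init : List β),
      (PySem.List.enumerate P (s : Int)).foldl (fun out q => step out q.2 (F q.1.toNat)) init =
      (P.zip ((List.range P.length).map (fun i => F (s + i)))).foldl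
        (fun out pb => step out pb.1 pb.2) init := by
  induction P with
  | nil => intro s init; rfl
  | cons p ps ih =>
    intro s init
    rw [PySem.List.enumerate_cons]
    simp only [List.foldl_cons, List.length_cons, List.range_succ_eq_map, List.map_cons,
      List.map_map, List.zip_cons_cons]
    have hcast : ((s : Int) + 1) = ((s + 1 : Nat) : Int) := by push_cast; ring
    rw [hcast, ih (s + 1)]
    simp only [Int.toNat_natCast, Nat.add_zero]
    congr 1
    · congr 1
      refine List.map_congr_left (fun i _ => ?_)
      simp only [Function.comp_apply]
      congr 1
      omega

theorem testbit_beq (m n : Nat) : ((m >>> n) % 2 == 1) = m.testBit n := by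
  simp [Nat.testBit_eq_decide_div_mod_eq, Nat.shiftRight_eq_div_pow, beq_eq_decide]

theorem apply_eq_var (chars : List Char) (P : List Int) (mask : Nat)
    (hpw : P.Pairwise (· < ·))
    (hin : ∀ p ∈ P, 0 ≤ p ∧ p < (chars.length : Int)) :
    pvApply chars P P.length mask = pvVar 0 chars (P.zip (pvBitsOf P.length mask)) := by
  unfold pvApply
  simp only [testbit_beq]
  have h0 : (0 : Int) = ((0 : Nat) : Int) := rfl
  rw [h0, enum_fold_zip P (fun i => mask.testBit (P.length - 1 - i))
    (fun out p b => if b then PySem.List.pySetD out p (pvRepl (PySem.List.pyGetD chars p ' ')) else out) 0 chars]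
  have hbits : (List.range P.length).map (fun i => mask.testBit (P.length - 1 - (0 + i))) =
      pvBitsOf P.length mask := by
    simp [pvBitsOf]
  rw [hbits]
  set bits := pvBitsOf P.length mask with hbdef
  have hblen : bits.length = P.length := by simp [hbdef, pvBitsOf]
  have hfst : (P.zip bits).map Prod.fst = P := List.map_fst_zip (by omega)
  have hin' : ∀ pb ∈ P.zip bits, 0 ≤ pb.1 ∧ pb.1 < (chars.length : Int) := by
    intro pb hpb
    exact hin pb.1 (by rw [← hfst]; exact List.mem_map_of_mem hpb)
  have hpw' : (P.zip bits).Pairwise (fun x y => x.1 < y.1) := by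
    have : ((P.zip bits).map Prod.fst).Pairwise (· < ·) := by rw [hfst]; exact hpw
    exact (List.pairwise_map).mp this
  have hcast0 : ((0 : Nat) : Int) = (0 : Int) := rfl
  rw [hcast0]
  refine List.ext_getElem? (fun j => ?_)
  rw [foldSets_getElem? chars (P.zip bits) hin' chars rfl j,
    pvVar_getElem? chars (P.zip bits) 0 hpw' (fun pb hpb => (hin' pb hpb).1) j]
  simp

-- ===== per-(k, positions) inner equality and the outer assembly =====
theorem inner_eq (chars : List Char) (P : List Int)
    (hgood : ∀ p ∈ P, ∃ j : Nat, (j : Int) = p ∧ ∃ c, chars[j]? = some c ∧ pvCR.contains c = true)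
    (hpw : P.Pairwise (· < ·)) :
    (pvProd ((PySem.List.enumerate chars 0).map (fun p =>
        if P.contains p.1 then pvCR.getD p.2 [] else [p.2]))).map (fun cs => String.ofList cs) =
    (List.range (2 ^ P.length)).map (fun mask => String.ofList (pvApply chars P P.length mask)) := by
  rw [options_eq_optsRec chars P 0]
  rw [prod_optsRec chars P 0 (by
    intro p hp
    obtain ⟨j, hj, hc⟩ := hgood p hp
    exact ⟨j, by omega, hc⟩) hpw]
  have hin : ∀ p ∈ P, 0 ≤ p ∧ p < (chars.length : Int) := by
    intro p hp
    obtain ⟨j, hj, c, hc, -⟩ := hgood p hp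
    obtain ⟨hlt, -⟩ := List.getElem?_eq_some_iff.mp hc
    omega
  have happ : ∀ mask, pvApply chars P P.length mask =
      pvVar 0 chars (P.zip (pvBitsOf P.length mask)) :=
    fun mask => apply_eq_var chars P mask hpw hin
  simp only [happ]
  rw [← range_pow_map_bitsOf P.length, List.map_map, List.map_map]
  rfl

theorem haxor_spec_aux (password : String) (limit : Int) :
    haxor password limit = haxor_alt password limit := by
  unfold haxor haxor_alt
  set chars := password.toList with hc
  set rpos : List Int :=
    ((PySem.List.enumerate chars 0).filter (fun p => pvCR.contains p.2)).map (fun p => p.1)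
    with hrpos
  have hrpos_mem : ∀ p ∈ rpos, ∃ j : Nat, (j : Int) = p ∧
      ∃ c, chars[j]? = some c ∧ pvCR.contains c = true := by
    intro p hp
    rw [hrpos] at hp
    obtain ⟨q, hq, rfl⟩ := List.mem_map.mp hp
    have hmemf := List.mem_of_mem_filter hq
    have hfilt := List.of_mem_filter hq
    obtain ⟨k, hk, rfl⟩ := (PySem.List.mem_enumerate_iff chars 0 q).mp hmemf
    exact ⟨k, by omega, chars[k], List.getElem?_eq_getElem hk, hfilt⟩
  have hrpos_pw : rpos.Pairwise (· < ·) := by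
    rw [hrpos]
    refine (List.pairwise_map).mpr ?_
    exact (PySem.List.pairwise_lt_enumerate chars 0).filter _
  refine PySem.List.foldl_congr_mem _ _ _ [] (fun acc k hk => ?_)
  rw [← combA_eq_combB]
  refine PySem.List.foldl_congr_mem _ _ _ acc (fun acc2 P hP => ?_)
  have hsub := mem_comb_sublist hP
  have hlen := mem_comb_length hP
  rw [PySem.List.foldl_append_singleton_eq_map, PySem.List.foldl_append_singleton_eq_map]
  rw [← hlen]
  exact congrArg (acc2 ++ ·)
    (inner_eq chars P (fun p hp => hrpos_mem p (hsub.mem hp)) (hrpos_pw.sublist hsub))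

-- ===== VERDICT (by name: the statement is the Claim_ definition above) =====
theorem haxor_spec : Claim_equal_haxor := by
  intro password limit _
  unfold Spec_haxor
  exact haxor_spec_aux password limit
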